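-- pv_equiv track=rewrite | github.com/jsrv07/Applied-problem-solving-in-CP | Akshit_22b2531/week8/09_count_of_integers_with_sum_of_digits_k.py | count_numbers_with_sum_k
-- ===== SOURCE A (Python) =====
-- def count_numbers_with_sum_k(n, k):
--     from functools import lru_cache
--     digits = list(map(int, str(n)))
--
--     @lru_cache(maxsize=None)
--     def dp(pos, tight, sum_):
--         if pos == len(digits):
--             return 1 if sum_ == k else 0
--         res = 0
--         limit = digits[pos] if tight else 9
--         for d in range(0, limit+1):
--             res += dp(pos+1, tight and d==limit, sum_+d)
--         return res
--     return dp(0, True, 0)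
-- ===== SOURCE B (Python) =====
-- def count_numbers_with_sum_k(n, k):
--     digits = list(map(int, str(n)))
--     L = len(digits)
--     # ways[i][s] = number of length-i digit strings (leading zeros allowed) with digit sum s
--     ways = [[1]]
--     for i in range(1, L + 1):
--         prev = ways[-1]
--         ways.append([sum(prev[s - d] for d in range(10) if 0 <= s - d < len(prev))
--                      for s in range(9 * i + 1)])
--     total = 0
--     prefix = 0
--     for p, dig in enumerate(digits):
--         rem = L - p - 1
--         for d in range(dig):
--             r = k - prefix - d
--             if 0 <= r <= 9 * rem:
--                 total += ways[rem][r]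
--         prefix += dig
--     return total + (1 if prefix == k else 0)
-- ===== Notes on version B (the rewrite author's own statement) =====
-- stated objective: alternative
-- what changed: Replaced A's memoized top-down digit-DP recursion over (pos, tight, sum) with a bottom-up precomputed table of free-digit-string counts plus a single left-to-right tight scan that accumulates the prefix digit sum.
import Mathlib
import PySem

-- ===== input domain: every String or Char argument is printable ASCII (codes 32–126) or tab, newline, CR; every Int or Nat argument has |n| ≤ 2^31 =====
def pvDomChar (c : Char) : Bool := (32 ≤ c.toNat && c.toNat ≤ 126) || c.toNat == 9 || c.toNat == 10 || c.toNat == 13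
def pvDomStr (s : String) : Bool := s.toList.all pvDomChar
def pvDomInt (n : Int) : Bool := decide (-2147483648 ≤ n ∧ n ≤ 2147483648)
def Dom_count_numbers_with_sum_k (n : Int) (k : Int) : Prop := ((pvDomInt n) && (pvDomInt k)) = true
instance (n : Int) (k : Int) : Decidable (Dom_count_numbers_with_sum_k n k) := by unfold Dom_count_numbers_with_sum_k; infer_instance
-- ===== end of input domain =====

-- B replaces A's memoized top-down digit-DP recursion by a bottom-up table of free-suffix
-- counts plus one left-to-right tight scan (objective: alternative decomposition).

-- shared helper: both Pythons contain the identical line `digits = list(map(int, str(n)))`.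
-- int(c) for a single char is ported as c.toNat - 48: exact when c is a decimal digit;
-- on other chars Python raises ValueError — that happens only for n < 0, excluded by Pre_.
def pvDigits (n : Int) : List Int :=
  (PySem.Int.toChars n).map (fun c => (c.toNat : Int) - 48)

-- ===== PORT A =====
-- A's `@lru_cache` memoization is ported explicitly: a PySem.Dict keyed by dp's
-- arguments (pos, tight, sum_) threaded through the recursion; `rest` is digits[pos:].
-- The `for d in range(0, limit+1)` loop is countA_loop, recursing over that range.
mutual
def countA_dp (k : Int) (pos : Int) (rest : List Int) (tight : Bool) (sum_ : Int)
    (cache : PySem.Dict (Int × Bool × Int) Int) : Int × PySem.Dict (Int × Bool × Int) Int :=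
  match cache.get? (pos, tight, sum_) with
  | some v => (v, cache)
  | none =>
    match rest with
    | [] =>
        let res : Int := if sum_ = k then 1 else 0
        (res, cache.insert (pos, tight, sum_) res)
    | d :: rest' =>
        let limit : Int := if tight then d else 9
        let rc := countA_loop k pos rest' tight limit sum_ (PySem.List.pyRange 0 (limit + 1) 1) (0, cache)
        (rc.1, rc.2.insert (pos, tight, sum_) rc.1)
termination_by (rest.length, 0)

def countA_loop (k : Int) (pos : Int) (rest' : List Int) (tight : Bool) (limit : Int) (sum_ : Int) :
    List Int → Int × PySem.Dict (Int × Bool × Int) Int → Int × PySem.Dict (Int × Bool × Int) Int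
  | [], rc => rc
  | dd :: dds, rc =>
      let vc := countA_dp k (pos + 1) rest' (tight && decide (dd = limit)) (sum_ + dd) rc.2
      countA_loop k pos rest' tight limit sum_ dds (rc.1 + vc.1, vc.2)
termination_by dds rc => (rest'.length, dds.length + 1)
end

def count_numbers_with_sum_k (n : Int) (k : Int) : Int :=
  (countA_dp k 0 (pvDigits n) true 0 ⟨[]⟩).1

-- ===== PORT B =====
-- one row of the table: [sum(prev[s-d] for d in range(10) if 0 <= s-d < len(prev)) for s in range(9*i+1)]
def pvRow (prev : List Int) (i : Int) : List Int :=
  (PySem.List.pyRange 0 (9 * i + 1) 1).map (fun s =>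
    (((PySem.List.pyRange 0 10 1).filter
        (fun d => decide (0 ≤ s - d) && decide (s - d < (prev.length : Int)))).map
      (fun d => PySem.List.pyGetD prev (s - d) 0)).sum)

-- the `for i in range(1, L+1)` loop appending rows; ways[-1] is pyGetD … (-1)
def pvWays (L : Int) : List (List Int) :=
  (PySem.List.pyRange 1 (L + 1) 1).foldl
    (fun ways i => ways ++ [pvRow (PySem.List.pyGetD ways (-1) []) i]) [[1]]

-- body of `for p, dig in enumerate(digits)`, state = (total, prefix)
def pvScanStep (k L : Int) (ways : List (List Int)) (tp : Int × Int) (pd : Int × Int) : Int × Int :=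
  let rem := L - pd.1 - 1
  ((PySem.List.pyRange 0 pd.2 1).foldl
      (fun t d =>
        let r := k - tp.2 - d
        if 0 ≤ r ∧ r ≤ 9 * rem then
          t + PySem.List.pyGetD (PySem.List.pyGetD ways rem []) r 0
        else t) tp.1,
   tp.2 + pd.2)

def count_numbers_with_sum_k_alt (n : Int) (k : Int) : Int :=
  let digits := pvDigits n
  let L : Int := digits.length
  let ways := pvWays L
  let tp := (PySem.List.enumerate digits 0).foldl (pvScanStep k L ways) (0, 0)
  tp.1 + (if tp.2 = k then 1 else 0)

-- ===== PRECONDITION & SPEC =====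
-- A raises ValueError for n < 0 (int('-') on the sign character), so those inputs are excluded.
def Pre_count_numbers_with_sum_k (n : Int) (k : Int) : Prop := 0 ≤ n
instance (n : Int) (k : Int) : Decidable (Pre_count_numbers_with_sum_k n k) := by unfold Pre_count_numbers_with_sum_k; infer_instance
def pvWitness_count_numbers_with_sum_k : Int × Int := (235, 8)

def Spec_count_numbers_with_sum_k (n : Int) (k : Int) (out : Int) : Prop := out = count_numbers_with_sum_k_alt n k
instance (n : Int) (k : Int) (out : Int) : Decidable (Spec_count_numbers_with_sum_k n k out) := by unfold Spec_count_numbers_with_sum_k; infer_instance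

-- ===== CLAIM (what is proved, stated in full; the proofs are below) =====
def Claim_equal_count_numbers_with_sum_k : Prop := ∀ (n : Int) (k : Int), Dom_count_numbers_with_sum_k n k → Pre_count_numbers_with_sum_k n k → Spec_count_numbers_with_sum_k n k (count_numbers_with_sum_k n k)

-- ===== LEMMAS AND PROOFS =====

-- pure (memo-free) version of A's dp; the memoized port is proved equal to it below
def pvDp (k : Int) : List Int → Bool → Int → Int
  | [], _, sum_ => if sum_ = k then 1 else 0
  | d :: rest, tight, sum_ =>
      let limit : Int := if tight then d else 9
      (PySem.List.pyRange 0 (limit + 1) 1).foldl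
        (fun res dd => res + pvDp k rest (tight && decide (dd = limit)) (sum_ + dd)) 0

-- math model: W m t = number of length-m digit strings with sum t
def pvW : Nat → Int → Int
  | 0, t => if t = 0 then 1 else 0
  | m + 1, t => ((PySem.List.pyRange 0 10 1).map (fun d => pvW m (t - d))).sum

theorem pvW_eq_zero (m : Nat) (t : Int) (h : t < 0 ∨ 9 * m < t) : pvW m t = 0 := by
  induction m generalizing t with
  | zero => simp only [pvW]; rw [if_neg (by omega)]
  | succ m ih =>
      simp only [pvW]
      apply List.sum_eq_zero
      intro x hx
      obtain ⟨dd, hdd, rfl⟩ := List.mem_map.mp hx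
      rw [PySem.List.mem_pyRange_one] at hdd
      apply ih
      push_cast at h ⊢
      omega

-- every digit produced by pvDigits for n ≥ 0 is in [0, 9]
theorem pvDigitChar_bounds (m : Nat) (hm : m < 10) :
    48 ≤ (Nat.digitChar m).toNat ∧ (Nat.digitChar m).toNat ≤ 57 := by
  interval_cases m <;> decide

theorem pvToDigitsCore_bounds : ∀ (f n : Nat) (acc : List Char), ∀ c ∈ Nat.toDigitsCore 10 f n acc,
    c ∈ acc ∨ (48 ≤ c.toNat ∧ c.toNat ≤ 57) := by
  intro f
  induction f with
  | zero => intro n acc c hc; exact Or.inl hc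
  | succ f ih =>
      intro n acc c hc
      simp only [Nat.toDigitsCore] at hc
      have hdig := pvDigitChar_bounds (n % 10) (by omega)
      split_ifs at hc with h
      · rcases List.mem_cons.mp hc with h1 | h1
        · exact Or.inr (h1 ▸ hdig)
        · exact Or.inl h1
      · rcases ih (n / 10) _ c hc with h1 | h1
        · rcases List.mem_cons.mp h1 with h2 | h2
          · exact Or.inr (h2 ▸ hdig)
          · exact Or.inl h2
        · exact Or.inr h1

theorem pvDigits_bounds (n : Int) (hn : 0 ≤ n) :
    ∀ d ∈ pvDigits n, 0 ≤ d ∧ d ≤ 9 := by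
  intro d hd
  obtain ⟨c, hc, rfl⟩ := List.mem_map.mp hd
  rw [PySem.Int.toChars, if_neg (not_lt.mpr hn)] at hc
  rw [Nat.toDigits] at hc
  rcases pvToDigitsCore_bounds _ _ _ c hc with h | h
  · exact absurd h (List.not_mem_nil)
  · omega

-- A with tight = false counts free digit strings: depends only on the length
theorem countA_free (k : Int) (rest : List Int) (s : Int) :
    pvDp k rest false s = pvW rest.length (k - s) := by
  induction rest generalizing s with
  | nil =>
      simp only [pvDp, pvW, List.length_nil]
      by_cases h : s = k
      · rw [if_pos h, if_pos (by omega)]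
      · rw [if_neg h, if_neg (by omega)]
  | cons d rest ih =>
      simp only [pvDp, Bool.false_and, Bool.false_eq_true, if_false, List.length_cons]
      rw [PySem.List.foldl_add _ (fun dd => pvDp k rest false (s + dd)) 0, zero_add]
      simp only [pvW]
      apply congrArg List.sum
      apply List.map_congr_left
      intro dd _
      rw [ih, show k - (s + dd) = k - s - dd by ring]

-- tight unrolling of A
theorem countA_tight (k d : Int) (rest : List Int) (s : Int) (hd : 0 ≤ d) :
    pvDp k (d :: rest) true s =
      ((PySem.List.pyRange 0 d 1).map (fun dd => pvW rest.length (k - s - dd))).sum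
        + pvDp k rest true (s + d) := by
  simp only [pvDp, if_pos, Bool.true_and]
  rw [PySem.List.pyRange_one_succ_right hd, List.foldl_append]
  have hcongr : ∀ (acc : Int), ∀ dd ∈ PySem.List.pyRange 0 d 1,
      acc + pvDp k rest (decide (dd = d)) (s + dd)
        = acc + pvW rest.length (k - s - dd) := by
    intro acc dd hdd
    rw [PySem.List.mem_pyRange_one] at hdd
    rw [decide_eq_false (by omega), countA_free,
        show k - (s + dd) = k - s - dd by ring]
  rw [PySem.List.foldl_congr_mem _ _ _ 0 hcongr,
      PySem.List.foldl_add _ (fun dd => pvW rest.length (k - s - dd)) 0, zero_add]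
  simp [List.foldl]

-- sum over a filtered list = sum with the failing terms as 0 (not found in Mathlib/PySem)
theorem pvSum_filter (l : List Int) (p : Int → Bool) (f : Int → Int) :
    ((l.filter p).map f).sum = (l.map (fun d => if p d then f d else 0)).sum := by
  induction l with
  | nil => rfl
  | cons x l ih => by_cases h : p x <;> simp [h, ih]

-- one row-step of B's table realizes the pvW recurrence
theorem pvRow_eq (m : Nat) :
    pvRow ((PySem.List.pyRange 0 ((9 * m + 1 : Nat) : Int) 1).map (pvW m)) ((m : Int) + 1)
      = (PySem.List.pyRange 0 ((9 * (m + 1) + 1 : Nat) : Int) 1).map (pvW (m + 1)) := by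
  unfold pvRow
  rw [show 9 * ((m : Int) + 1) + 1 = ((9 * (m + 1) + 1 : Nat) : Int) by push_cast; ring]
  apply List.map_congr_left
  intro s _
  have hlen : (((PySem.List.pyRange 0 ((9 * m + 1 : Nat) : Int) 1).map (pvW m)).length : Int)
      = ((9 * m + 1 : Nat) : Int) := by
    simp [PySem.List.length_pyRange_one]
    omega
  rw [pvSum_filter]
  simp only [pvW]
  apply congrArg List.sum
  apply List.map_congr_left
  intro d hd
  rw [PySem.List.mem_pyRange_one] at hd
  rw [hlen]
  by_cases hc : 0 ≤ s - d ∧ s - d < ((9 * m + 1 : Nat) : Int)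
  · rw [if_pos (by simp; omega),
        PySem.List.pyGetD_map_pyRange_of_nonneg _ _ _ _ hc.1 hc.2]
  · rw [if_neg (by simpa using hc), pvW_eq_zero m (s - d) (by push_cast at hc ⊢; omega)]

-- the table rows are pvW
theorem pvWays_eq (L : Nat) :
    pvWays (L : Int) =
      (List.range (L + 1)).map (fun i => (PySem.List.pyRange 0 ((9 * i + 1 : Nat) : Int) 1).map (pvW i)) := by
  induction L with
  | zero => decide
  | succ L ih =>
      unfold pvWays
      rw [show ((L + 1 : Nat) : Int) + 1 = ((L : Int) + 1) + 1 by push_cast; ring,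
          PySem.List.pyRange_one_succ_right (by omega), List.foldl_append]
      have : (PySem.List.pyRange 1 ((L : Int) + 1) 1).foldl
          (fun ways i => ways ++ [pvRow (PySem.List.pyGetD ways (-1) []) i]) [[1]] = pvWays (L : Int) := rfl
      rw [this, ih]
      simp only [List.foldl_cons, List.foldl_nil]
      have hne : (List.range (L + 1)).map
          (fun i => (PySem.List.pyRange 0 ((9 * i + 1 : Nat) : Int) 1).map (pvW i)) ≠ [] := by
        simp
      rw [PySem.List.pyGetD_neg_one _ _ hne]
      have hlast : ((List.range (L + 1)).map
          (fun i => (PySem.List.pyRange 0 ((9 * i + 1 : Nat) : Int) 1).map (pvW i))).getLast hne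
          = (PySem.List.pyRange 0 ((9 * L + 1 : Nat) : Int) 1).map (pvW L) := by
        rw [List.getLast_eq_getElem]
        simp
      rw [hlast, pvRow_eq]
      rw [show (List.range (L + 1 + 1)) = List.range (L + 1) ++ [L + 1] from List.range_succ]
      rw [List.map_append]
      simp

theorem pvWays_lookup (L : Nat) (rem r : Int) (h0 : 0 ≤ rem) (hL : rem ≤ (L : Int))
    (hr0 : 0 ≤ r) (hr1 : r ≤ 9 * rem) :
    PySem.List.pyGetD (PySem.List.pyGetD (pvWays (L : Int)) rem []) r 0 = pvW rem.toNat r := by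
  rw [pvWays_eq]
  rw [PySem.List.pyGetD_eq_getElem _ _ h0 (by simp; omega)]
  rw [List.getElem_map, List.getElem_range]
  exact PySem.List.pyGetD_map_pyRange_of_nonneg _ _ _ _ hr0 (by push_cast; omega)

-- the whole scan equals A's dp, generalized over the suffix
theorem pvScan_eq (k : Int) (L : Nat) (suffix : List Int) (p : Int) (hp : 0 ≤ p)
    (hlen : p + (suffix.length : Int) = (L : Int))
    (hds : ∀ d ∈ suffix, 0 ≤ d ∧ d ≤ 9) (total s : Int) :
    (let tp := (PySem.List.enumerate suffix p).foldl
        (pvScanStep k (L : Int) (pvWays (L : Int))) (total, s)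
     tp.1 + (if tp.2 = k then 1 else 0)) = total + pvDp k suffix true s := by
  induction suffix generalizing p total s with
  | nil =>
      simp only [PySem.List.enumerate_nil, List.foldl_nil, pvDp]
      rfl
  | cons d rest ih =>
      have hd0 : 0 ≤ d := (hds d (List.mem_cons_self)).1
      rw [PySem.List.enumerate_cons, List.foldl_cons]
      have hrem : (L : Int) - p - 1 = (rest.length : Int) := by
        simp only [List.length_cons] at hlen; push_cast at hlen ⊢; omega
      have hstep : pvScanStep k (L : Int) (pvWays (L : Int)) (total, s) (p, d)
          = (total + ((PySem.List.pyRange 0 d 1).map (fun dd => pvW rest.length (k - s - dd))).sum,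
             s + d) := by
        unfold pvScanStep
        simp only [Prod.mk.injEq]
        refine ⟨?_, trivial⟩
        · have hcongr : ∀ (t : Int), ∀ dd ∈ PySem.List.pyRange 0 d 1,
              (let r := k - s - dd
               if 0 ≤ r ∧ r ≤ 9 * ((L : Int) - p - 1) then
                 t + PySem.List.pyGetD
                   (PySem.List.pyGetD (pvWays (L : Int)) ((L : Int) - p - 1) []) r 0
               else t)
              = t + pvW rest.length (k - s - dd) := by
            intro t dd _
            by_cases hc : 0 ≤ k - s - dd ∧ k - s - dd ≤ 9 * ((L : Int) - p - 1)
            · rw [if_pos hc,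
                  pvWays_lookup L _ _ (by omega) (by omega) hc.1 hc.2,
                  show ((L : Int) - p - 1).toNat = rest.length by omega]
            · rw [if_neg hc, pvW_eq_zero rest.length (k - s - dd) (by omega),
                  add_zero]
          rw [PySem.List.foldl_congr_mem _ _ _ total hcongr,
              PySem.List.foldl_add _ (fun dd => pvW rest.length (k - s - dd)) total]
      rw [hstep, ih (p + 1) (by omega) (by simp only [List.length_cons] at hlen; push_cast at hlen ⊢; omega)
            (fun x hx => hds x (List.mem_cons_of_mem _ hx)),
          countA_tight k d rest s hd0]
      ring

-- cache invariant: every stored value is the pure dp value of its key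
def pvGood (k : Int) (ds : List Int) (cache : PySem.Dict (Int × Bool × Int) Int) : Prop :=
  ∀ pos tight s v, cache.get? (pos, tight, s) = some v →
    0 ≤ pos ∧ v = pvDp k (ds.drop pos.toNat) tight s

theorem pvGood_insert (k : Int) (ds : List Int) (cache : PySem.Dict (Int × Bool × Int) Int)
    (pos : Int) (tight : Bool) (s v : Int) (hpos : 0 ≤ pos)
    (hv : v = pvDp k (ds.drop pos.toNat) tight s) (h : pvGood k ds cache) :
    pvGood k ds (cache.insert (pos, tight, s) v) := by
  intro pos' tight' s' v' hv'
  by_cases he : (pos', tight', s') = (pos, tight, s)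
  · rw [he, PySem.Dict.get?_insert_self] at hv'
    cases hv'
    simp only [Prod.mk.injEq] at he
    obtain ⟨h1, h2, h3⟩ := he
    subst h1; subst h2; subst h3
    exact ⟨hpos, hv⟩
  · rw [PySem.Dict.get?_insert_of_ne _ _ he] at hv'
    exact h _ _ _ _ hv'

-- the memoized port computes the pure dp and preserves the invariant
theorem pvDp_correct (k : Int) (ds : List Int) :
    ∀ (rest : List Int) (pos : Int) (tight : Bool) (s : Int)
      (cache : PySem.Dict (Int × Bool × Int) Int),
      0 ≤ pos → ds.drop pos.toNat = rest → pvGood k ds cache →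
      (countA_dp k pos rest tight s cache).1 = pvDp k rest tight s ∧
      pvGood k ds (countA_dp k pos rest tight s cache).2 := by
  intro rest
  induction rest with
  | nil =>
      intro pos tight s cache hpos hdrop hg
      rw [countA_dp]
      cases hv : cache.get? (pos, tight, s) with
      | some v =>
          simp only []
          obtain ⟨_, hveq⟩ := hg pos tight s v hv
          rw [hdrop] at hveq
          exact ⟨hveq, hg⟩
      | none =>
          simp only []
          refine ⟨by simp only [pvDp], ?_⟩
          exact pvGood_insert k ds cache pos tight s _ hpos
            (by rw [hdrop]; simp only [pvDp]) hg
  | cons d rest' ih =>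
      intro pos tight s cache hpos hdrop hg
      rw [countA_dp]
      cases hv : cache.get? (pos, tight, s) with
      | some v =>
          simp only []
          obtain ⟨_, hveq⟩ := hg pos tight s v hv
          rw [hdrop] at hveq
          exact ⟨hveq, hg⟩
      | none =>
          simp only []
          have hdrop' : ds.drop (pos + 1).toNat = rest' := by
            have h1 : (pos + 1).toNat = pos.toNat + 1 := by omega
            rw [h1, ← List.drop_drop, hdrop]
            rfl
          have hloop : ∀ (dds : List Int) (acc : Int)
              (c : PySem.Dict (Int × Bool × Int) Int), pvGood k ds c →
              (countA_loop k pos rest' tight (if tight then d else 9) s dds (acc, c)).1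
                = acc + (dds.map (fun dd =>
                    pvDp k rest' (tight && decide (dd = (if tight then d else 9))) (s + dd))).sum
              ∧ pvGood k ds
                  (countA_loop k pos rest' tight (if tight then d else 9) s dds (acc, c)).2 := by
            intro dds
            induction dds with
            | nil => intro acc c hc; rw [countA_loop]; simp [hc]
            | cons dd dds ihd =>
                intro acc c hc
                rw [countA_loop]
                obtain ⟨h1, h2⟩ := ih (pos + 1)
                  (tight && decide (dd = (if tight then d else 9))) (s + dd) c
                  (by omega) hdrop' hc
                obtain ⟨h3, h4⟩ := ihd (acc + (countA_dp k (pos + 1) rest'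
                  (tight && decide (dd = (if tight then d else 9))) (s + dd) c).1) _ h2
                refine ⟨?_, h4⟩
                rw [h3, h1, List.map_cons, List.sum_cons]
                ring
          obtain ⟨hl1, hl2⟩ := hloop
            (PySem.List.pyRange 0 ((if tight then d else 9) + 1) 1) 0 cache hg
          have hval : (countA_loop k pos rest' tight (if tight then d else 9) s
              (PySem.List.pyRange 0 ((if tight then d else 9) + 1) 1) (0, cache)).1
              = pvDp k (d :: rest') tight s := by
            rw [hl1, zero_add, pvDp]
            rw [PySem.List.foldl_add _ (fun dd =>
              pvDp k rest' (tight && decide (dd = (if tight then d else 9))) (s + dd)) 0, zero_add]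
          exact ⟨hval, pvGood_insert k ds _ pos tight s _ hpos
            (by rw [hdrop, hval]) hl2⟩

-- ===== VERDICT (by name: the statement is the Claim_ definition above) =====
theorem count_numbers_with_sum_k_spec : Claim_equal_count_numbers_with_sum_k := by
  intro n k _ hn
  unfold Spec_count_numbers_with_sum_k count_numbers_with_sum_k count_numbers_with_sum_k_alt
  have hA := (pvDp_correct k (pvDigits n) (pvDigits n) 0 true 0 ⟨[]⟩ le_rfl (by simp)
    (by intro pos tight s v hv; simp [PySem.Dict.get?] at hv)).1
  have h := pvScan_eq k (pvDigits n).length (pvDigits n) 0 le_rfl (by simp)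
    (pvDigits_bounds n hn) 0 0
  simp only [] at h hA ⊢
  omega
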